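-- pv_equiv track=rewrite | github.com/AtlasovNV/projectADS | CampaignDesigner/mainapp/titles.py | title_slice
-- ===== SOURCE A (Python) =====
-- def title_slice(keywords_split):
--     first_title = []
--     second_title = []
--     counter = -1
--     keywords_split = keywords_split.split()
--     for word in keywords_split:
--         counter += len(word) + 1
--         if counter <= 35:
--             first_title.append(word)
--         else:
--             second_title.append(word)
--     first_title = ' '.join(word for word in first_title)
--     second_title = ' '.join(word for word in second_title)
--     if second_title is not '':
--         new_list = [first_title, second_title]
--     else:
--         new_list = [first_title, '-']
--     return new_list
-- ===== SOURCE B (Python) =====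
-- def title_slice(keywords_split):
--     words = keywords_split.split()
--     # find the split index: the joined prefix length is monotone, so the
--     # partition is a prefix/suffix split at the first word that overflows 35
--     i = 0
--     total = -1
--     while i < len(words) and total + len(words[i]) + 1 <= 35:
--         total += len(words[i]) + 1
--         i += 1
--     first = ' '.join(words[:i])
--     second = ' '.join(words[i:])
--     return [first, second if second != '' else '-']
-- ===== Notes on version B (the rewrite author's own statement) =====
-- stated objective: alternative
-- what changed: B computes the split index by accumulating the joined-prefix length until it would exceed 35, then slices words[:i]/words[i:], instead of A's per-word conditional appends into two accumulator lists.
import Mathlib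
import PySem

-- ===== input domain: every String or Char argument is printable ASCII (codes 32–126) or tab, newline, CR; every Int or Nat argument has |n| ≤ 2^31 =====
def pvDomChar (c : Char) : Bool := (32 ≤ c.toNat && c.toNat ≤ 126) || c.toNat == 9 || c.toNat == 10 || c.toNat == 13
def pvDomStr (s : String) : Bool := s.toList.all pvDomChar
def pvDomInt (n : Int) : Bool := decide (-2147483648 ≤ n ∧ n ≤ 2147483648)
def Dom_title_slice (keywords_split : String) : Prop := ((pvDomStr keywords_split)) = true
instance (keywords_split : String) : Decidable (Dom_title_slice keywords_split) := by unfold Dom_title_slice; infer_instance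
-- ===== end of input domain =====

-- B replaces A's two conditional accumulator lists by computing the split index of the
-- monotone joined-prefix length and slicing (alternative decomposition, same cost).


-- ===== PORT A =====
-- loop state: (first_title, second_title, counter)
def title_slice (keywords_split : String) : List String :=
  let words := PySem.Str.split₀ keywords_split
  let st := words.foldl
    (fun (s : List String × List String × Int) word =>
      let c := s.2.2 + PySem.Str.len word + 1
      if c ≤ 35 then (s.1 ++ [word], s.2.1, c) else (s.1, s.2.1 ++ [word], c))
    ([], [], -1)
  let first_title := PySem.Str.join " " st.1
  let second_title := PySem.Str.join " " st.2.1
  if second_title ≠ "" then [first_title, second_title] else [first_title, "-"]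

-- ===== PORT B =====
-- Source B's while loop: advance the index while the next word still fits
def tsSplitIdx : List String → Int → Nat
  | [], _ => 0
  | w :: ws, total =>
    if total + PySem.Str.len w + 1 ≤ 35 then tsSplitIdx ws (total + PySem.Str.len w + 1) + 1
    else 0

def title_slice_alt (keywords_split : String) : List String :=
  let words := PySem.Str.split₀ keywords_split
  let i := tsSplitIdx words (-1)
  let first := PySem.Str.join " " (words.take i)
  let second := PySem.Str.join " " (words.drop i)
  [first, if second ≠ "" then second else "-"]

-- ===== PRECONDITION & SPEC =====
def Spec_title_slice (keywords_split : String) (out : List String) : Prop := out = title_slice_alt keywords_split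
instance (keywords_split : String) (out : List String) : Decidable (Spec_title_slice keywords_split out) := by unfold Spec_title_slice; infer_instance

-- ===== CLAIM (what is proved, stated in full; the proofs are below) =====
def Claim_equal_title_slice : Prop := ∀ (keywords_split : String), Dom_title_slice keywords_split → Spec_title_slice keywords_split (title_slice keywords_split)

-- ===== LEMMAS AND PROOFS =====

theorem ts_len_nonneg (w : String) : 0 ≤ PySem.Str.len w := by
  simp [PySem.Str.len_eq]

-- once the counter has passed 35 it stays there, so no later word fits
theorem tsSplitIdx_of_gt (ws : List String) (total : Int) (h : 35 < total) :
    tsSplitIdx ws total = 0 := by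
  cases ws with
  | nil => rfl
  | cons w ws =>
    have := ts_len_nonneg w
    simp only [tsSplitIdx, if_neg (by omega : ¬ total + PySem.Str.len w + 1 ≤ 35)]

-- A's fold from any accumulators equals appending the take/drop at B's split index
theorem ts_loop_eq (ws : List String) (total : Int) (f0 s0 : List String) :
    (ws.foldl
      (fun (s : List String × List String × Int) word =>
        let c := s.2.2 + PySem.Str.len word + 1
        if c ≤ 35 then (s.1 ++ [word], s.2.1, c) else (s.1, s.2.1 ++ [word], c))
      (f0, s0, total)).1 = f0 ++ ws.take (tsSplitIdx ws total)
    ∧ (ws.foldl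
      (fun (s : List String × List String × Int) word =>
        let c := s.2.2 + PySem.Str.len word + 1
        if c ≤ 35 then (s.1 ++ [word], s.2.1, c) else (s.1, s.2.1 ++ [word], c))
      (f0, s0, total)).2.1 = s0 ++ ws.drop (tsSplitIdx ws total) := by
  induction ws generalizing total f0 s0 with
  | nil => simp [tsSplitIdx]
  | cons w ws ih =>
    have hlen : PySem.Str.len w = (w.length : Int) := by simp [PySem.Str.len_eq]
    by_cases h : total + PySem.Str.len w + 1 ≤ 35
    · have h' : total + (w.length : Int) < 35 := by omega
      simpa [tsSplitIdx, hlen, h, h', List.foldl_cons] using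
        ih (total + PySem.Str.len w + 1) (f0 ++ [w]) s0
    · have h' : ¬ total + (w.length : Int) < 35 := by omega
      have h35 : 35 < total + PySem.Str.len w + 1 := by omega
      have h0 := tsSplitIdx_of_gt ws (total + PySem.Str.len w + 1) h35
      rw [hlen] at h0
      simpa [tsSplitIdx, hlen, h, h', h0, List.foldl_cons] using
        ih (total + PySem.Str.len w + 1) f0 (s0 ++ [w])

-- ===== VERDICT (by name: the statement is the Claim_ definition above) =====
theorem title_slice_spec : Claim_equal_title_slice := by
  intro ks _
  unfold Spec_title_slice title_slice title_slice_alt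
  obtain ⟨h1, h2⟩ := ts_loop_eq (PySem.Str.split₀ ks) (-1) [] []
  simp only [h1, h2, List.nil_append]
  split_ifs with h <;> simp_all
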